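-- pv_equiv track=rewrite | github.com/Zharkyn20/codewars | May_8/prostate_cancer_recurrence.py | recurrence
-- ===== SOURCE A (Python) =====
-- def recurrence(values):
--     prev, count = 0, -1
--     values = values[values.index(min(values)):]
--
--     for i in range(len(values)):
--         if values[i] > prev:
--             count += 1
--         else:
--             count = 0
--         prev = values[i]
--         if count > 2:
--             return True
--     return False
-- ===== SOURCE B (Python) =====
-- def recurrence(values):
--     vs = values[values.index(min(values)):]
--     return any(a < b < c < d for a, b, c, d in zip(vs, vs[1:], vs[2:], vs[3:]))
-- ===== Notes on version B (the rewrite author's own statement) =====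
-- stated objective: simpler
-- what changed: Replaced the stateful prev/streak-counter loop with early return by a stateless existence test over length-4 windows (zip of shifted lists); the first-minimum slice is kept.
import Mathlib
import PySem

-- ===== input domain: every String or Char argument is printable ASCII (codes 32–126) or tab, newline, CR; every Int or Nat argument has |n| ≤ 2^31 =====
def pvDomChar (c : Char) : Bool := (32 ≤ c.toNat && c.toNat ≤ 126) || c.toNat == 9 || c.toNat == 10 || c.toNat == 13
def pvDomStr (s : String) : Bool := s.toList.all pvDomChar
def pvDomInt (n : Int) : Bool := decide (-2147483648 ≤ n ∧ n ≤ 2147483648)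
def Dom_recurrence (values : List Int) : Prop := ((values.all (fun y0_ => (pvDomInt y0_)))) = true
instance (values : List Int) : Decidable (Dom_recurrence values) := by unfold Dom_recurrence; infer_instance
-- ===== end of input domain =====

-- B replaces A's stateful streak-counter loop by a stateless length-4-window existence test (simpler decomposition); return-value equivalence on nonempty lists (A raises ValueError on []).

-- ===== PORT A =====
-- the for-loop: state (prev, count), early return when count > 2
def recLoopA : List Int → Int → Int → Bool
  | [], _, _ => false
  | v :: rest, prev, count =>
    let count' := if v > prev then count + 1 else 0
    if count' > 2 then true else recLoopA rest v count'

def recurrence (values : List Int) : Bool :=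
  match PySem.List.min? values (fun x => x) with
  | none => false   -- unreachable under Pre_: min of an empty sequence raises ValueError
  | some m =>
    match PySem.List.index? values m with
    | none => false -- unreachable: the minimum is a member
    | some idx =>
      let vs := PySem.List.slice values (some (idx : Int)) none
      recLoopA vs 0 (-1)

-- ===== PORT B =====
-- any(a < b < c < d for a,b,c,d in zip(vs, vs[1:], vs[2:], vs[3:])): scan the length-4 windows
def winB : List Int → Bool
  | a :: b :: c :: d :: rest => (a < b && b < c && c < d) || winB (b :: c :: d :: rest)
  | _ => false

def recurrence_alt (values : List Int) : Bool :=
  match PySem.List.min? values (fun x => x) with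
  | none => false
  | some m =>
    match PySem.List.index? values m with
    | none => false
    | some idx =>
      let vs := PySem.List.slice values (some (idx : Int)) none
      winB vs

-- ===== PRECONDITION & SPEC =====
-- A raises ValueError on empty input (min of an empty sequence); both programs return on every nonempty list.
def Pre_recurrence (values : List Int) : Prop := values ≠ []
instance (values : List Int) : Decidable (Pre_recurrence values) := by unfold Pre_recurrence; infer_instance
def pvWitness_recurrence : List Int := ([3, 1, 2, 3, 4])

def Spec_recurrence (values : List Int) (out : Bool) : Prop := out = recurrence_alt values
instance (values : List Int) (out : Bool) : Decidable (Spec_recurrence values out) := by unfold Spec_recurrence; infer_instance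

-- ===== CLAIM (what is proved, stated in full; the proofs are below) =====
def Claim_equal_recurrence : Prop := ∀ (values : List Int), Dom_recurrence values → Pre_recurrence values → Spec_recurrence values (recurrence values)

-- ===== LEMMAS AND PROOFS =====

-- "the first k elements of vs exist and strictly increase, starting above prev"
def incFrom : Int → List Int → Nat → Bool
  | _, _, 0 => true
  | _, [], _ + 1 => false
  | prev, v :: rest, k + 1 => (prev < v) && incFrom v rest k

theorem incFrom_mono (vs : List Int) (prev : Int) (k k' : Nat) (hk : k' ≤ k)
    (h : incFrom prev vs k = true) : incFrom prev vs k' = true := by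
  induction vs generalizing prev k k' with
  | nil => cases k' with
    | zero => rfl
    | succ n => cases k with
      | zero => omega
      | succ m => simp [incFrom] at h
  | cons v rest ih =>
    cases k' with
    | zero => rfl
    | succ n =>
      cases k with
      | zero => omega
      | succ m =>
        simp [incFrom] at h ⊢
        exact ⟨h.1, ih v m n (by omega) h.2⟩

theorem winB_cons (v : Int) (rest : List Int) :
    winB (v :: rest) = (incFrom v rest 3 || winB rest) := by
  match rest with
  | [] => rfl
  | [b] => simp [winB, incFrom]
  | [b, c] => simp [winB, incFrom]
  | b :: c :: d :: t => simp [winB, incFrom, Bool.and_assoc]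

theorem recLoopA_eq (vs : List Int) (prev : Int) (c : Int) (h0 : 0 ≤ c) (h2 : c ≤ 2) :
    recLoopA vs prev c = (incFrom prev vs (3 - c).toNat || winB vs) := by
  induction vs generalizing prev c with
  | nil =>
    have : (3 - c).toNat = (3 - c).toNat - 1 + 1 := by omega
    rw [this]
    simp [recLoopA, incFrom, winB]
  | cons v rest ih =>
    have h3 : (3 - c).toNat = (2 - c).toNat + 1 := by omega
    by_cases hv : v > prev
    · by_cases hc : c = 2
      · subst hc
        simp [recLoopA, hv, incFrom]
      · have hcount : ¬ (c + 1 > 2) := by omega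
        rw [show recLoopA (v :: rest) prev c = recLoopA rest v (c + 1) by
          simp [recLoopA, hv, hcount]]
        rw [ih v (c + 1) (by omega) (by omega), winB_cons, h3]
        have h4 : (3 - (c + 1)).toNat = (2 - c).toNat := by omega
        rw [h4]
        simp [incFrom, hv]
        by_cases hinc : incFrom v rest (2 - c).toNat = true
        · simp [hinc]
        · simp [hinc]
          intro h5
          exact absurd (incFrom_mono rest v 3 (2 - c).toNat (by omega) h5) hinc
  -- A's 'else' branch resets the streak; the window starting above prev is dead
    · rw [show recLoopA (v :: rest) prev c = recLoopA rest v 0 by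
        simp [recLoopA, hv]]
      rw [ih v 0 (by omega) (by omega), winB_cons, h3]
      simp [incFrom, hv]

-- the first loop iteration always sets count to 0 (whether via -1 + 1 or the reset)
theorem recLoopA_start (v : Int) (rest : List Int) (prev : Int) :
    recLoopA (v :: rest) prev (-1) = winB (v :: rest) := by
  by_cases hv : v > prev
  · rw [show recLoopA (v :: rest) prev (-1) = recLoopA rest v 0 by
      simp [recLoopA, hv]]
    rw [recLoopA_eq rest v 0 (by omega) (by omega), winB_cons]
    rfl
  · rw [show recLoopA (v :: rest) prev (-1) = recLoopA rest v 0 by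
      simp [recLoopA, hv]]
    rw [recLoopA_eq rest v 0 (by omega) (by omega), winB_cons]
    rfl

theorem recLoopA_init (vs : List Int) : recLoopA vs 0 (-1) = winB vs := by
  cases vs with
  | nil => rfl
  | cons v rest => exact recLoopA_start v rest 0

-- ===== VERDICT (by name: the statement is the Claim_ definition above) =====
theorem recurrence_spec : Claim_equal_recurrence := by
  intro values _ _
  unfold Spec_recurrence recurrence recurrence_alt
  cases PySem.List.min? values (fun x => x) with
  | none => rfl
  | some m =>
    simp only
    cases PySem.List.index? values m with
    | none => rfl
    | some idx => exact recLoopA_init _
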